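-- pv_equiv track=rewrite | github.com/areomoon/sg_rental_finder | src/processor/enricher.py | _estimate_commute_from_district
-- ===== SOURCE A (Python) =====
-- from typing import Optional
--
-- def _estimate_commute_from_district(district: str, destination: str) -> Optional[float]:
--     """
--     Rough commute estimate (minutes) based on SG district code.
--     Used as fallback when OneMap geocoding fails.
--     """
--     # District → approximate commute to City Hall (Funan area)
--     funan_estimates = {
--         "D01": 5,
--         "D02": 8,
--         "D06": 5,
--         "D07": 8,
--         "D08": 18,
--         "D09": 12,
--         "D10": 20,
--         "D11": 15,
--         "D12": 20,
--         "D03": 15,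
--         "D04": 20,
--         "D05": 25,
--     }
--     raffles_estimates = {k: max(v - 2, 3) for k, v in funan_estimates.items()}
--
--     estimates = funan_estimates if destination == "funan" else raffles_estimates
--     return estimates.get(district.upper())
-- ===== SOURCE B (Python) =====
-- from typing import Optional
--
-- # Minutes to Funan (City Hall area) for districts D01..D12, indexed by district number.
-- _BASE = [5, 8, 15, 20, 25, 5, 8, 18, 12, 20, 15, 20]
--
--
-- def _estimate_commute_from_district(district: str, destination: str) -> Optional[float]:
--     """
--     Rough commute estimate (minutes) based on SG district code.
--     Used as fallback when OneMap geocoding fails.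
--     """
--     d = district.upper()
--     if len(d) == 3 and d[0] == "D" and d[1].isdigit() and d[2].isdigit():
--         n = 10 * (ord(d[1]) - ord("0")) + (ord(d[2]) - ord("0"))
--         if 1 <= n <= 12:
--             v = _BASE[n - 1]
--             return v if destination == "funan" else max(v - 2, 3)
--     return None
-- ===== Notes on version B (the rewrite author's own statement) =====
-- stated objective: alternative
-- what changed: B replaces the string-keyed dictionary lookup (and A's per-call construction of a second derived dict) by parsing the district code 'Dnn' into its number and indexing a 12-entry list of base minutes, applying the max(v-2,3) adjustment inline for non-funan destinations.
import Mathlib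
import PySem

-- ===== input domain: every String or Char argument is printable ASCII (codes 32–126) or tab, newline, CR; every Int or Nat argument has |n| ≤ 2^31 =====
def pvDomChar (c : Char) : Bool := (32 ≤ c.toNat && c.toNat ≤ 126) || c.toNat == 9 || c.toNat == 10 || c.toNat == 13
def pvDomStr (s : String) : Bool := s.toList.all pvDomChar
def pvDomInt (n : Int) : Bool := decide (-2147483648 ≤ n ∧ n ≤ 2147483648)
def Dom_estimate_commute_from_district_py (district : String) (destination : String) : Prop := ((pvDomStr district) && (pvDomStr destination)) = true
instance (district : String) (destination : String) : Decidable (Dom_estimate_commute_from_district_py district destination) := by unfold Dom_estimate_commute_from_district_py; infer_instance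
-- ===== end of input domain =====

-- B parses the district code "Dnn" into its number and indexes a 12-entry list of base minutes,
-- instead of A's per-call construction of two string-keyed dictionaries and a hash lookup.

-- ===== PORT A =====
def estimate_commute_from_district_py (district : String) (destination : String) : Option Int :=
  let funan_estimates : PySem.Dict String Int := PySem.Dict.ofList
    [("D01", 5), ("D02", 8), ("D06", 5), ("D07", 8), ("D08", 18), ("D09", 12),
     ("D10", 20), ("D11", 15), ("D12", 20), ("D03", 15), ("D04", 20), ("D05", 25)]
  let raffles_estimates : PySem.Dict String Int :=
    PySem.Dict.ofList (funan_estimates.items.map (fun kv => (kv.1, max (kv.2 - 2) 3)))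
  let estimates := if destination == "funan" then funan_estimates else raffles_estimates
  estimates.get? (PySem.Str.upper district)

-- ===== PORT B =====
-- base minutes to Funan for districts D01..D12, indexed by district number (Source B's _BASE)
def pvBase : List Int := [5, 8, 15, 20, 25, 5, 8, 18, 12, 20, 15, 20]

def estimate_commute_from_district_py_alt (district : String) (destination : String) : Option Int :=
  match (PySem.Str.upper district).toList with
  | [c0, c1, c2] =>
    if c0 == 'D' && PySem.Chars.isdigit c1 && PySem.Chars.isdigit c2 then
      let n : Int := 10 * ((c1.toNat : Int) - 48) + ((c2.toNat : Int) - 48)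
      if 1 ≤ n ∧ n ≤ 12 then
        match PySem.List.pyGet? pvBase (n - 1) with
        | some v => if destination == "funan" then some v else some (max (v - 2) 3)
        | none => none
      else none
    else none
  | _ => none

-- ===== PRECONDITION & SPEC =====
def Spec_estimate_commute_from_district_py (district : String) (destination : String) (out : Option Int) : Prop := out = estimate_commute_from_district_py_alt district destination
instance (district : String) (destination : String) (out : Option Int) : Decidable (Spec_estimate_commute_from_district_py district destination out) := by unfold Spec_estimate_commute_from_district_py; infer_instance

-- ===== CLAIM (what is proved, stated in full; the proofs are below) =====
def Claim_equal_estimate_commute_from_district_py : Prop := ∀ (district : String) (destination : String), Dom_estimate_commute_from_district_py district destination → Spec_estimate_commute_from_district_py district destination (estimate_commute_from_district_py district destination)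

-- ===== LEMMAS AND PROOFS =====

def pvKeys : List String :=
  ["D01", "D02", "D03", "D04", "D05", "D06", "D07", "D08", "D09", "D10", "D11", "D12"]

-- a string outside the 12 keys is found by neither dict
theorem pv_get_none (u : String) (hu : u ∉ pvKeys)
    {v1 v2 v3 v4 v5 v6 v7 v8 v9 v10 v11 v12 : Int} :
    (PySem.Dict.mk
      [("D01", v1), ("D02", v2), ("D06", v3), ("D07", v4), ("D08", v5), ("D09", v6),
       ("D10", v7), ("D11", v8), ("D12", v9), ("D03", v10), ("D04", v11), ("D05", v12)]).get? u = none := by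
  simp only [pvKeys, List.mem_cons, List.not_mem_nil, or_false] at hu
  push Not at hu
  obtain ⟨h1, h2, h3, h4, h5, h6, h7, h8, h9, h10, h11, h12⟩ := hu
  simp [beq_iff_eq,
    Ne.symm h1, Ne.symm h2, Ne.symm h3, Ne.symm h4, Ne.symm h5, Ne.symm h6,
    Ne.symm h7, Ne.symm h8, Ne.symm h9, Ne.symm h10, Ne.symm h11, Ne.symm h12, PySem.Dict.get?]

-- a 3-character string "D" + two digits whose numeric value lies in 1..12 is one of the 12 keys
theorem pv_in_keys (u : String) (c1 c2 : Char) (hl : u.toList = ['D', c1, c2])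
    (h1 : 48 ≤ c1.toNat ∧ c1.toNat ≤ 57) (h2 : 48 ≤ c2.toNat ∧ c2.toNat ≤ 57)
    (hr : 1 ≤ 10 * ((c1.toNat : Int) - 48) + ((c2.toNat : Int) - 48) ∧
          10 * ((c1.toNat : Int) - 48) + ((c2.toNat : Int) - 48) ≤ 12) :
    u ∈ pvKeys := by
  have step : ∀ d1 d2 : Char, c1 = d1 → c2 = d2 → u.toList = ['D', d1, d2] := by
    rintro d1 d2 rfl rfl; exact hl
  have hval : (c1.toNat = 48 ∧ (c2.toNat = 49 ∨ c2.toNat = 50 ∨ c2.toNat = 51 ∨ c2.toNat = 52 ∨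
                c2.toNat = 53 ∨ c2.toNat = 54 ∨ c2.toNat = 55 ∨ c2.toNat = 56 ∨ c2.toNat = 57)) ∨
              (c1.toNat = 49 ∧ (c2.toNat = 48 ∨ c2.toNat = 49 ∨ c2.toNat = 50)) := by omega
  rcases hval with ⟨ha, hb | hb | hb | hb | hb | hb | hb | hb | hb⟩ | ⟨ha, hb | hb | hb⟩
  · have e : u = "D01" := String.toList_inj.mp (by rw [step '0' '1' (Char.ext (UInt32.toNat_inj.mp ha)) (Char.ext (UInt32.toNat_inj.mp hb))]; decide)
    simp [e, pvKeys]
  · have e : u = "D02" := String.toList_inj.mp (by rw [step '0' '2' (Char.ext (UInt32.toNat_inj.mp ha)) (Char.ext (UInt32.toNat_inj.mp hb))]; decide)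
    simp [e, pvKeys]
  · have e : u = "D03" := String.toList_inj.mp (by rw [step '0' '3' (Char.ext (UInt32.toNat_inj.mp ha)) (Char.ext (UInt32.toNat_inj.mp hb))]; decide)
    simp [e, pvKeys]
  · have e : u = "D04" := String.toList_inj.mp (by rw [step '0' '4' (Char.ext (UInt32.toNat_inj.mp ha)) (Char.ext (UInt32.toNat_inj.mp hb))]; decide)
    simp [e, pvKeys]
  · have e : u = "D05" := String.toList_inj.mp (by rw [step '0' '5' (Char.ext (UInt32.toNat_inj.mp ha)) (Char.ext (UInt32.toNat_inj.mp hb))]; decide)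
    simp [e, pvKeys]
  · have e : u = "D06" := String.toList_inj.mp (by rw [step '0' '6' (Char.ext (UInt32.toNat_inj.mp ha)) (Char.ext (UInt32.toNat_inj.mp hb))]; decide)
    simp [e, pvKeys]
  · have e : u = "D07" := String.toList_inj.mp (by rw [step '0' '7' (Char.ext (UInt32.toNat_inj.mp ha)) (Char.ext (UInt32.toNat_inj.mp hb))]; decide)
    simp [e, pvKeys]
  · have e : u = "D08" := String.toList_inj.mp (by rw [step '0' '8' (Char.ext (UInt32.toNat_inj.mp ha)) (Char.ext (UInt32.toNat_inj.mp hb))]; decide)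
    simp [e, pvKeys]
  · have e : u = "D09" := String.toList_inj.mp (by rw [step '0' '9' (Char.ext (UInt32.toNat_inj.mp ha)) (Char.ext (UInt32.toNat_inj.mp hb))]; decide)
    simp [e, pvKeys]
  · have e : u = "D10" := String.toList_inj.mp (by rw [step '1' '0' (Char.ext (UInt32.toNat_inj.mp ha)) (Char.ext (UInt32.toNat_inj.mp hb))]; decide)
    simp [e, pvKeys]
  · have e : u = "D11" := String.toList_inj.mp (by rw [step '1' '1' (Char.ext (UInt32.toNat_inj.mp ha)) (Char.ext (UInt32.toNat_inj.mp hb))]; decide)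
    simp [e, pvKeys]
  · have e : u = "D12" := String.toList_inj.mp (by rw [step '1' '2' (Char.ext (UInt32.toNat_inj.mp ha)) (Char.ext (UInt32.toNat_inj.mp hb))]; decide)
    simp [e, pvKeys]

-- outside the 12 keys the parse-and-index pipeline yields none, for every destination
theorem pv_b_none (u destination : String) (hu : u ∉ pvKeys) :
    (match u.toList with
      | [c0, c1, c2] =>
        if c0 == 'D' && PySem.Chars.isdigit c1 && PySem.Chars.isdigit c2 then
          if 1 ≤ 10 * ((c1.toNat : Int) - 48) + ((c2.toNat : Int) - 48) ∧
             10 * ((c1.toNat : Int) - 48) + ((c2.toNat : Int) - 48) ≤ 12 then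
            match PySem.List.pyGet? pvBase
                (10 * ((c1.toNat : Int) - 48) + ((c2.toNat : Int) - 48) - 1) with
            | some v => if destination == "funan" then some v else some (max (v - 2) 3)
            | none => none
          else none
        else none
      | _ => (none : Option Int)) = none := by
  rcases hl : u.toList with _ | ⟨c0, _ | ⟨c1, _ | ⟨c2, _ | ⟨c3, t⟩⟩⟩⟩ <;> try rfl
  · by_cases hcond : (c0 == 'D' && PySem.Chars.isdigit c1 && PySem.Chars.isdigit c2) = true
    · simp only [hcond, if_true]
      by_cases hr : 1 ≤ 10 * ((c1.toNat : Int) - 48) + ((c2.toNat : Int) - 48) ∧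
          10 * ((c1.toNat : Int) - 48) + ((c2.toNat : Int) - 48) ≤ 12
      · exfalso
        simp only [Bool.and_eq_true, beq_iff_eq] at hcond
        obtain ⟨⟨hc0, hd1⟩, hd2⟩ := hcond
        have h1 : 48 ≤ c1.toNat ∧ c1.toNat ≤ 57 := by
          simpa only [PySem.Chars.isdigit, Bool.and_eq_true, decide_eq_true_eq] using hd1
        have h2 : 48 ≤ c2.toNat ∧ c2.toNat ≤ 57 := by
          simpa only [PySem.Chars.isdigit, Bool.and_eq_true, decide_eq_true_eq] using hd2
        exact hu (pv_in_keys u c1 c2 (by rw [hl, hc0]) h1 h2 hr)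
      · simp only [hr, if_false]
    · simp only [Bool.not_eq_true] at hcond
      simp only [hcond, Bool.false_eq_true, if_false]

-- ===== VERDICT (by name: the statement is the Claim_ definition above) =====
theorem estimate_commute_from_district_py_spec : Claim_equal_estimate_commute_from_district_py := by
  intro district destination _
  unfold Spec_estimate_commute_from_district_py estimate_commute_from_district_py
    estimate_commute_from_district_py_alt
  have hF : PySem.Dict.ofList
      [("D01", 5), ("D02", 8), ("D06", 5), ("D07", 8), ("D08", 18), ("D09", 12),
       ("D10", 20), ("D11", 15), ("D12", 20), ("D03", 15), ("D04", 20), ("D05", 25)] =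
      PySem.Dict.mk
      [("D01", (5:Int)), ("D02", 8), ("D06", 5), ("D07", 8), ("D08", 18), ("D09", 12),
       ("D10", 20), ("D11", 15), ("D12", 20), ("D03", 15), ("D04", 20), ("D05", 25)] := by decide
  have hR : PySem.Dict.ofList
      (List.map (fun kv => (kv.1, max (kv.2 - 2) 3))
        (PySem.Dict.mk
          [("D01", (5:Int)), ("D02", 8), ("D06", 5), ("D07", 8), ("D08", 18), ("D09", 12),
           ("D10", 20), ("D11", 15), ("D12", 20), ("D03", 15), ("D04", 20), ("D05", 25)]).items) =
      PySem.Dict.mk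
      (List.map (fun kv => (kv.1, max (kv.2 - 2) 3))
        [("D01", (5:Int)), ("D02", 8), ("D06", 5), ("D07", 8), ("D08", 18), ("D09", 12),
         ("D10", 20), ("D11", 15), ("D12", 20), ("D03", 15), ("D04", 20), ("D05", 25)]) := by decide
  simp only [hF, hR]
  generalize PySem.Str.upper district = u
  by_cases hu : u ∈ pvKeys
  · simp only [pvKeys, List.mem_cons, List.not_mem_nil, or_false] at hu
    rcases hu with rfl | rfl | rfl | rfl | rfl | rfl | rfl | rfl | rfl | rfl | rfl | rfl <;>
      cases hd : destination == "funan" <;> decide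
  · refine Eq.trans ?_ (pv_b_none u destination hu).symm
    cases hd : destination == "funan" <;>
      simp [pv_get_none u hu]
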